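-- pv_equiv track=rewrite | github.com/grackhack/random | app/routes.py | get_play_history
-- ===== SOURCE A (Python) =====
-- from typing import List, Tuple
--
-- def get_play_history(row: List[int], positive=True) -> List[str]:
--     play = 0 if positive == '1' else 1
--     ng = False
--     res = []
--     cnt = 1
--     for i in row[::-1]:
--         if i == play and not ng:
--             cnt = 1
--             ng = True
--             res.append(str(cnt))
--         elif i == play and ng:
--             cnt += 1
--             res.append(str(cnt))
--         else:
--             res.append('•')
--             ng = False
--     return res[::-1]
-- ===== SOURCE B (Python) =====
-- def get_play_history(row, positive=True):
--     play = 0 if positive == '1' else 1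
--     res = []
--     rest = row
--     while rest:
--         x = rest[0]
--         L = 1
--         while L < len(rest) and rest[L] == x:
--             L += 1
--         if x == play:
--             res.extend(str(k) for k in range(L, 0, -1))
--         else:
--             res.extend(['•'] * L)
--         rest = rest[L:]
--     return res
-- ===== Notes on version B (the rewrite author's own statement) =====
-- stated objective: simpler
-- what changed: A scans the reversed row with an ng/cnt state machine and reverses the result; B makes a single forward pass grouping the row into maximal runs and emits str(L)..str(1) for play-runs and L bullets otherwise, with no reversals.
import Mathlib
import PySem

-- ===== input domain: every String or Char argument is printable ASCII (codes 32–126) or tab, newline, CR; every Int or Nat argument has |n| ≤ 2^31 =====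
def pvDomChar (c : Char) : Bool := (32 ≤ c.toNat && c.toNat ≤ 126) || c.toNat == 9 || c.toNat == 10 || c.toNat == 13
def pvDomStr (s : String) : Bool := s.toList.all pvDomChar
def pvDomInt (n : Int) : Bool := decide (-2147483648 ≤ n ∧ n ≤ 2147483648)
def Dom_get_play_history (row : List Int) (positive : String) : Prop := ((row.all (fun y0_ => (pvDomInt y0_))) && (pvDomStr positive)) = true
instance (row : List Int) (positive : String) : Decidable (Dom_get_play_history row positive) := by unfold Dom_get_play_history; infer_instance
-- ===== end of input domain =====

-- B replaces A's reversed state-machine scan by a forward run-length grouping pass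
-- with no reversals (objective: simpler decomposition, same O(n) cost).

-- ===== PORT A =====
-- literal transliteration: fold over row[::-1] with state (ng, res, cnt), then res[::-1]
def get_play_history (row : List Int) (positive : String) : List String :=
  let play : Int := if positive == "1" then 0 else 1
  let st := (row.reverse).foldl
    (fun (s : Bool × List String × Int) (i : Int) =>
      if i = play ∧ s.1 = false then
        (true, s.2.1 ++ [PySem.Int.toStr 1], (1 : Int))
      else if i = play ∧ s.1 = true then
        (true, s.2.1 ++ [PySem.Int.toStr (s.2.2 + 1)], s.2.2 + 1)
      else
        (false, s.2.1 ++ ["•"], s.2.2))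
    (false, ([] : List String), (1 : Int))
  st.2.1.reverse

-- ===== PORT B =====
-- str(L), str(L-1), …, str(1)  (B's `range(L, 0, -1)` generator)
def pvDescStrs : Nat → List String
  | 0 => []
  | n + 1 => PySem.Int.toStr ((n : Int) + 1) :: pvDescStrs n

-- B's outer while-loop over `rest`; the inner counting loop / `rest[L:]` are the
-- takeWhile-length / dropWhile of the leading run
def pvRunsGo (play : Int) : List Int → List String
  | [] => []
  | x :: xs =>
    let L := (xs.takeWhile (fun y => y == x)).length + 1
    let rest := xs.dropWhile (fun y => y == x)
    (if x = play then pvDescStrs L else List.replicate L "•") ++ pvRunsGo play rest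
termination_by l => l.length
decreasing_by
  simp only [List.length_cons]
  exact Nat.lt_succ_of_le (List.length_dropWhile_le _ _)

def get_play_history_alt (row : List Int) (positive : String) : List String :=
  let play : Int := if positive == "1" then 0 else 1
  pvRunsGo play row

-- ===== PRECONDITION & SPEC =====
def Spec_get_play_history (row : List Int) (positive : String) (out : List String) : Prop := out = get_play_history_alt row positive
instance (row : List Int) (positive : String) (out : List String) : Decidable (Spec_get_play_history row positive out) := by unfold Spec_get_play_history; infer_instance

-- ===== CLAIM (what is proved, stated in full; the proofs are below) =====
def Claim_equal_get_play_history : Prop := ∀ (row : List Int) (positive : String), Dom_get_play_history row positive → Spec_get_play_history row positive (get_play_history row positive)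

-- ===== LEMMAS AND PROOFS =====

-- A's loop, split into output-free state transition and state-free output
def pvStep (play : Int) (s : Bool × Int) (i : Int) : Bool × Int :=
  if i = play ∧ s.1 = false then (true, 1)
  else if i = play ∧ s.1 = true then (true, s.2 + 1)
  else (false, s.2)

def pvOut (play : Int) (s : Bool × Int) (i : Int) : String :=
  if i = play ∧ s.1 = false then PySem.Int.toStr 1
  else if i = play ∧ s.1 = true then PySem.Int.toStr (s.2 + 1)
  else "•"

def pvGo (play : Int) : List Int → Bool × Int → List String
  | [], _ => []
  | i :: t, s => pvOut play s i :: pvGo play t (pvStep play s i)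

lemma pvA_fold (play : Int) (l : List Int) : ∀ (ng : Bool) (res : List String) (cnt : Int),
    l.foldl
      (fun (s : Bool × List String × Int) (i : Int) =>
        if i = play ∧ s.1 = false then
          (true, s.2.1 ++ [PySem.Int.toStr 1], (1 : Int))
        else if i = play ∧ s.1 = true then
          (true, s.2.1 ++ [PySem.Int.toStr (s.2.2 + 1)], s.2.2 + 1)
        else
          (false, s.2.1 ++ ["•"], s.2.2))
      (ng, res, cnt)
    = ((l.foldl (pvStep play) (ng, cnt)).1,
       res ++ pvGo play l (ng, cnt),
       (l.foldl (pvStep play) (ng, cnt)).2) := by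
  induction l with
  | nil => intro ng res cnt; simp [pvGo]
  | cons i t ih =>
    intro ng res cnt
    simp only [List.foldl_cons, pvGo]
    by_cases h1 : i = play ∧ ng = false
    · simp [pvStep, pvOut, h1, ih, List.append_assoc]
    · by_cases h2 : i = play ∧ ng = true
      · simp [pvStep, pvOut, h2, ih, List.append_assoc]
      · simp [pvStep, pvOut, h1, h2, ih, List.append_assoc]

lemma pvGo_append (play : Int) (l1 l2 : List Int) : ∀ s,
    pvGo play (l1 ++ l2) s = pvGo play l1 s ++ pvGo play l2 (l1.foldl (pvStep play) s) := by
  induction l1 with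
  | nil => intro s; simp [pvGo]
  | cons i t ih => intro s; simp [pvGo, ih]

lemma pvGo_bullets (play x : Int) (hx : x ≠ play) : ∀ (L : Nat) (s : Bool × Int),
    pvGo play (List.replicate L x) s = List.replicate L "•" := by
  intro L
  induction L with
  | zero => intro s; simp [pvGo]
  | succ m ih =>
    intro s
    simp only [List.replicate_succ, pvGo, ih]
    have : ¬ (x = play) := hx
    simp [pvOut, this]

lemma pvGo_asc_true (play : Int) : ∀ (m : Nat) (c : Int),
    pvGo play (List.replicate m play) (true, c)
      = (List.range m).map (fun k : Nat => PySem.Int.toStr (c + (k : Int) + 1)) := by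
  intro m
  induction m with
  | zero => intro c; simp [pvGo]
  | succ m ih =>
    intro c
    rw [List.replicate_succ, List.range_succ_eq_map]
    simp only [pvGo, pvStep, pvOut, List.map_cons, List.map_map]
    refine List.cons_eq_cons.mpr ⟨by simp, ?_⟩
    simp only [and_true, true_and, if_true]
    norm_num
    rw [ih]
    apply List.map_congr_left
    intro k _
    simp only [Function.comp_apply]
    congr 1
    push_cast
    ring

lemma pvGo_asc (play : Int) (L : Nat) (c : Int) :
    pvGo play (List.replicate L play) (false, c)
      = (List.range L).map (fun k : Nat => PySem.Int.toStr ((k : Int) + 1)) := by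
  cases L with
  | zero => simp [pvGo]
  | succ m =>
    rw [List.replicate_succ, List.range_succ_eq_map]
    simp only [pvGo, pvStep, pvOut, List.map_cons, List.map_map]
    refine List.cons_eq_cons.mpr ⟨by simp, ?_⟩
    norm_num
    rw [pvGo_asc_true]
    apply List.map_congr_left
    intro k _
    simp only [Function.comp_apply]
    congr 1
    push_cast
    ring

lemma pvDesc_eq (L : Nat) :
    ((List.range L).map (fun k : Nat => PySem.Int.toStr ((k : Int) + 1))).reverse = pvDescStrs L := by
  induction L with
  | zero => simp [pvDescStrs]
  | succ m ih =>
    rw [List.range_succ]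
    simp only [List.map_append, List.reverse_append, List.map_cons, List.map_nil,
      List.reverse_cons, List.reverse_nil, List.nil_append, pvDescStrs, ih]
    rfl

lemma pvStep_fst (play : Int) (s : Bool × Int) (y : Int) :
    (pvStep play s y).1 = decide (y = play) := by
  by_cases h : y = play
  · rcases s with ⟨ng, c⟩
    cases ng <;> simp [pvStep, h]
  · simp [pvStep, h]

lemma pvDropHead (p : Int → Bool) : ∀ (l : List Int) (y : Int) (r : List Int),
    l.dropWhile p = y :: r → p y = false := by
  intro l
  induction l with
  | nil => intro y r h; simp [List.dropWhile] at h
  | cons a t ih =>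
    intro y r h
    by_cases hp : p a
    · rw [List.dropWhile_cons_of_pos hp] at h; exact ih y r h
    · rw [List.dropWhile_cons_of_neg hp] at h
      cases h; simpa using hp

lemma pvRun_repl (x : Int) (xs : List Int) :
    x :: xs.takeWhile (fun y => y == x)
      = List.replicate ((xs.takeWhile (fun y => y == x)).length + 1) x := by
  rw [List.eq_replicate_iff]
  refine ⟨by simp, ?_⟩
  intro b hb
  rcases List.mem_cons.mp hb with h | h
  · exact h
  · have := List.mem_takeWhile_imp h
    simpa using this

lemma pvDecomp (x : Int) (xs : List Int) :
    x :: xs = List.replicate ((xs.takeWhile (fun y => y == x)).length + 1) x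
      ++ xs.dropWhile (fun y => y == x) := by
  conv_lhs => rw [← List.takeWhile_append_dropWhile (p := fun y => y == x) (l := xs)]
  rw [← List.cons_append, pvRun_repl]

lemma pvMain (play : Int) : ∀ (n : Nat) (row : List Int), row.length ≤ n →
    (pvGo play row.reverse (false, 1)).reverse = pvRunsGo play row := by
  intro n
  induction n with
  | zero =>
    intro row h
    have : row = [] := List.eq_nil_of_length_eq_zero (Nat.le_zero.mp h)
    subst this; simp [pvGo, pvRunsGo]
  | succ n ih =>
    intro row h
    cases row with
    | nil => simp [pvGo, pvRunsGo]
    | cons x xs =>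
      have hrlen : (xs.dropWhile (fun y => y == x)).length ≤ n := by
        have h1 : (xs.dropWhile (fun y => y == x)).length ≤ xs.length :=
          List.length_dropWhile_le _ _
        have h2 : xs.length + 1 ≤ n + 1 := by simpa using h
        omega
      have hrev : (x :: xs).reverse
          = (xs.dropWhile (fun y => y == x)).reverse
            ++ List.replicate ((xs.takeWhile (fun y => y == x)).length + 1) x := by
        conv_lhs => rw [pvDecomp x xs]
        rw [List.reverse_append, List.reverse_replicate]
      have hsplit : pvGo play (x :: xs).reverse (false, 1)
          = pvGo play (xs.dropWhile (fun y => y == x)).reverse (false, 1)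
            ++ pvGo play (List.replicate ((xs.takeWhile (fun y => y == x)).length + 1) x)
              ((xs.dropWhile (fun y => y == x)).reverse.foldl (pvStep play) (false, 1)) := by
        rw [hrev, pvGo_append]
      have hIH : (pvGo play (xs.dropWhile (fun y => y == x)).reverse (false, 1)).reverse
          = pvRunsGo play (xs.dropWhile (fun y => y == x)) := ih _ hrlen
      have hblock : (pvGo play (List.replicate ((xs.takeWhile (fun y => y == x)).length + 1) x)
            ((xs.dropWhile (fun y => y == x)).reverse.foldl (pvStep play) (false, 1))).reverse
          = (if x = play then pvDescStrs ((xs.takeWhile (fun y => y == x)).length + 1)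
             else List.replicate ((xs.takeWhile (fun y => y == x)).length + 1) "•") := by
        by_cases hxp : x = play
        · have hS1 : ((xs.dropWhile (fun y => y == x)).reverse.foldl
              (pvStep play) ((false : Bool), (1 : Int))).1 = false := by
            cases hre : xs.dropWhile (fun y => y == x) with
            | nil => simp
            | cons y r' =>
              have hy : (y == x) = false := pvDropHead (fun y => y == x) xs y r' hre
              have hyne : y ≠ play := by
                intro hc; rw [hc, ← hxp] at hy; simp at hy
              rw [List.reverse_cons, List.foldl_append]
              simp [pvStep_fst, hyne]
          have hSeq : (xs.dropWhile (fun y => y == x)).reverse.foldl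
              (pvStep play) ((false : Bool), (1 : Int))
              = (false, ((xs.dropWhile (fun y => y == x)).reverse.foldl
                  (pvStep play) ((false : Bool), (1 : Int))).2) := by
            rcases hSs : (xs.dropWhile (fun y => y == x)).reverse.foldl
                (pvStep play) ((false : Bool), (1 : Int)) with ⟨b, c⟩
            rw [hSs] at hS1; simp at hS1; rw [hS1]
          rw [hxp] at hSeq ⊢
          rw [hSeq, pvGo_asc, pvDesc_eq, if_pos rfl]
        · rw [pvGo_bullets play x hxp, List.reverse_replicate, if_neg hxp]
      calc (pvGo play (x :: xs).reverse (false, 1)).reverse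
          = (pvGo play (List.replicate ((xs.takeWhile (fun y => y == x)).length + 1) x)
              ((xs.dropWhile (fun y => y == x)).reverse.foldl (pvStep play) (false, 1))).reverse
            ++ (pvGo play (xs.dropWhile (fun y => y == x)).reverse (false, 1)).reverse := by
            rw [hsplit, List.reverse_append]
        _ = (if x = play then pvDescStrs ((xs.takeWhile (fun y => y == x)).length + 1)
             else List.replicate ((xs.takeWhile (fun y => y == x)).length + 1) "•")
            ++ pvRunsGo play (xs.dropWhile (fun y => y == x)) := by
            rw [hblock, hIH]
        _ = pvRunsGo play (x :: xs) := by rw [pvRunsGo]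

-- ===== VERDICT (by name: the statement is the Claim_ definition above) =====
theorem get_play_history_spec : Claim_equal_get_play_history := by
  intro row positive _
  unfold Spec_get_play_history get_play_history get_play_history_alt
  simp only [pvA_fold]
  rw [List.nil_append]
  exact pvMain _ row.length row le_rfl
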